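-- pv_equiv track=rewrite | github.com/mosahle7/DSA_Python | arrays/maxIbdSumConf.py | brMax_sum
-- ===== SOURCE A (Python) =====
-- def brMax_sum(a,n):
--     ans=0
--     for i in range(n):
--         su=0
--         for j in range(n):
--             su+=j*a[(i+j)%n]
--
--         if su>ans: ans=su
--     return ans
-- ===== SOURCE B (Python) =====
-- def brMax_sum(a, n):
--     if n <= 0:
--         return 0
--     S = 0
--     cur = 0
--     for j in range(n):
--         S += a[j]
--         cur += j * a[j]
--     ans = 0
--     for i in range(n):
--         if cur > ans:
--             ans = cur
--         cur += n * a[i] - S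
--     return ans
-- ===== Notes on version B (the rewrite author's own statement) =====
-- stated objective: faster
-- what changed: B computes the weighted sum of rotation 0 once and then derives each next rotation's sum incrementally via cur += n*a[i] - S instead of recomputing every rotation's sum with an inner loop.
import Mathlib
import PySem

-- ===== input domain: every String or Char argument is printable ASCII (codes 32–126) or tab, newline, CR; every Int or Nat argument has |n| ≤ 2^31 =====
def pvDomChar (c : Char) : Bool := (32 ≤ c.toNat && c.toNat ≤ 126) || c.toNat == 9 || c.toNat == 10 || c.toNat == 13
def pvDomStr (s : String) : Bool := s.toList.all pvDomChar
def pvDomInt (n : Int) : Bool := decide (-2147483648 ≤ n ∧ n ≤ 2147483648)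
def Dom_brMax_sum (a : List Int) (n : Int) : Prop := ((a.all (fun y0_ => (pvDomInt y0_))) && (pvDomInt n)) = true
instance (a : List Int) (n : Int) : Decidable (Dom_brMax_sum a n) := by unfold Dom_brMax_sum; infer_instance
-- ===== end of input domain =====

-- B replaces A's rotation-by-rotation recomputation of the weighted sum by a single pass
-- using the incremental rotation formula cur_{i+1} = cur_i + n*a[i] - S (objective: faster).

-- ===== PORT A =====
def brMax_sum (a : List Int) (n : Int) : Int :=
  (PySem.List.pyRange 0 n 1).foldl (fun ans i =>
    let su := (PySem.List.pyRange 0 n 1).foldl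
      (fun su j => su + j * PySem.List.pyGetD a (PySem.Int.mod (i + j) n) 0) 0
    if su > ans then su else ans) 0

-- ===== PORT B =====
def brMax_sum_alt (a : List Int) (n : Int) : Int :=
  if n ≤ 0 then 0
  else
    let sc : Int × Int := (PySem.List.pyRange 0 n 1).foldl
      (fun (p : Int × Int) j =>
        (p.1 + PySem.List.pyGetD a j 0, p.2 + j * PySem.List.pyGetD a j 0)) (0, 0)
    ((PySem.List.pyRange 0 n 1).foldl
      (fun (p : Int × Int) i =>
        ((if p.2 > p.1 then p.2 else p.1), p.2 + n * PySem.List.pyGetD a i 0 - sc.1)) (0, sc.2)).1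

-- ===== PRECONDITION & SPEC =====
-- Pre_ excludes exactly the inputs where Python A raises IndexError: n > len(a).
def Pre_brMax_sum (a : List Int) (n : Int) : Prop := n ≤ (a.length : Int)
instance (a : List Int) (n : Int) : Decidable (Pre_brMax_sum a n) := by unfold Pre_brMax_sum; infer_instance
def pvWitness_brMax_sum : List Int × Int := ([1, 2, 3], 3)

def Spec_brMax_sum (a : List Int) (n : Int) (out : Int) : Prop := out = brMax_sum_alt a n
instance (a : List Int) (n : Int) (out : Int) : Decidable (Spec_brMax_sum a n out) := by unfold Spec_brMax_sum; infer_instance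

-- ===== CLAIM (what is proved, stated in full; the proofs are below) =====
def Claim_equal_brMax_sum : Prop := ∀ (a : List Int) (n : Int), Dom_brMax_sum a n → Pre_brMax_sum a n → Spec_brMax_sum a n (brMax_sum a n)

-- ===== LEMMAS AND PROOFS =====

-- the rotation sum of configuration i, and the plain element sum, over the first n slots
def pvF (a : List Int) (n : Int) (i : Int) : Int :=
  ∑ j ∈ Finset.range n.toNat, (j : Int) * PySem.List.pyGetD a ((i + j) % n) 0

def pvS (a : List Int) (n : Int) : Int :=
  ∑ j ∈ Finset.range n.toNat, PySem.List.pyGetD a (j : Int) 0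

lemma pv_mod_lt (n x : Int) (hn : 0 < n) : 0 ≤ x % n ∧ x % n < n :=
  ⟨Int.emod_nonneg x (by omega), Int.emod_lt_of_pos x hn⟩

lemma pv_mod_cancel (n i k : Int) (hk : 0 ≤ k) (hk2 : k < n) :
    (i + (k - i) % n) % n = k := by
  have h1 : i + (k - i) % n = k - (k - i) / n * n := by rw [Int.emod_def]; ring
  rw [h1, Int.sub_mul_emod_self_right, Int.emod_eq_of_lt hk hk2]

lemma pv_mod_cancel' (n i j : Int) (hj : 0 ≤ j) (hj2 : j < n) :
    ((i + j) % n - i) % n = j := by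
  have h1 : (i + j) % n - i = j - (i + j) / n * n := by rw [Int.emod_def]; ring
  rw [h1, Int.sub_mul_emod_self_right, Int.emod_eq_of_lt hj hj2]

lemma pv_sum_range (n : Nat) (f : Nat → Int) :
    ∑ i ∈ Finset.range n, f i = ((List.range n).map f).sum := by
  induction n with
  | zero => simp
  | succ m ih => rw [Finset.sum_range_succ, List.range_succ]; simp [ih]

-- reindexing the rotation sum by the position k = (i + j) % n
lemma pv_rot_reindex (g : Int → Int) (n : Int) (hn : 0 < n) (i : Int) :
    ∑ j ∈ Finset.range n.toNat, (j : Int) * g ((i + j) % n)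
      = ∑ k ∈ Finset.range n.toNat, ((k : Int) - i) % n * g k := by
  refine Finset.sum_nbij' (fun j => ((i + j) % n).toNat)
    (fun k => (((k : Int) - i) % n).toNat) ?_ ?_ ?_ ?_ ?_
  · intro j hj
    simp only [Finset.mem_range] at *
    have := pv_mod_lt n (i + j) hn
    omega
  · intro k hk
    simp only [Finset.mem_range] at *
    have := pv_mod_lt n ((k : Int) - i) hn
    omega
  · intro j hj
    simp only [Finset.mem_range] at hj
    have h0 := pv_mod_lt n (i + j) hn
    have h2 : (((((i + j) % n).toNat : Int)) - i) % n = (j : Int) := by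
      rw [Int.toNat_of_nonneg h0.1]
      exact pv_mod_cancel' n i j (by omega) (by omega)
    beta_reduce
    omega
  · intro k hk
    simp only [Finset.mem_range] at hk
    have h0 := pv_mod_lt n ((k : Int) - i) hn
    have h2 : (i + ((((k : Int) - i) % n).toNat : Int)) % n = (k : Int) := by
      rw [Int.toNat_of_nonneg h0.1]
      exact pv_mod_cancel n i k (by omega) (by omega)
    beta_reduce
    omega
  · intro j hj
    simp only [Finset.mem_range] at hj
    have h0 := pv_mod_lt n (i + j) hn
    rw [Int.toNat_of_nonneg h0.1]
    rw [pv_mod_cancel' n i j (by omega) (by omega)]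

-- one incremental step of the reindexed rotation sum
lemma pv_step (g : Int → Int) (n i : Int) (hn : 0 < n) (hi : 0 ≤ i) (hi2 : i < n) :
    ∑ k ∈ Finset.range n.toNat, ((k : Int) - (i + 1)) % n * g k
      = (∑ k ∈ Finset.range n.toNat, ((k : Int) - i) % n * g k) + n * g i
        - ∑ k ∈ Finset.range n.toNat, g k := by
  have key : ∀ k ∈ Finset.range n.toNat, ((k : Int) - (i + 1)) % n * g k
      = ((k : Int) - i) % n * g k - g k + (if k = i.toNat then n * g k else 0) := by
    intro k hk
    simp only [Finset.mem_range] at hk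
    have hkn : (k : Int) < n := by omega
    have h1 : ((k : Int) - (i + 1)) % n = (((k : Int) - i) % n - 1) % n := by
      have h2 : (k : Int) - (i + 1) = ((k : Int) - i) % n - 1 - (-(((k : Int) - i) / n)) * n := by
        rw [Int.emod_def]; ring
      rw [h2, Int.sub_mul_emod_self_right]
    by_cases hki : k = i.toNat
    · have hke : (k : Int) = i := by omega
      have hd : ((k : Int) - i) % n = 0 := by rw [hke]; simp
      have hm1 : ((0 : Int) - 1) % n = n - 1 := by
        have h3 : (0 : Int) - 1 = n - 1 - 1 * n := by ring
        rw [h3, Int.sub_mul_emod_self_right, Int.emod_eq_of_lt (by omega) (by omega)]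
      rw [h1, hd, hm1, if_pos hki]
      ring
    · have hd : ∃ d : Int, ((k : Int) - i) % n = d ∧ 1 ≤ d ∧ d < n := by
        rcases le_or_gt i (k : Int) with h | h
        · exact ⟨(k : Int) - i, Int.emod_eq_of_lt (by omega) (by omega), by omega, by omega⟩
        · refine ⟨(k : Int) - i + n, ?_, by omega, by omega⟩
          have h3 : (k : Int) - i = ((k : Int) - i + n) - 1 * n := by ring
          have h4 : ((k : Int) - i) % n = ((k : Int) - i + n) % n := by
            conv_lhs => rw [h3]
            rw [Int.sub_mul_emod_self_right]
          rw [h4, Int.emod_eq_of_lt (by omega) (by omega)]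
      obtain ⟨d, hd1, hd2, hd3⟩ := hd
      rw [h1, hd1, Int.emod_eq_of_lt (by omega) (by omega), if_neg hki]
      ring
  rw [Finset.sum_congr rfl key]
  rw [Finset.sum_add_distrib, Finset.sum_sub_distrib]
  rw [Finset.sum_ite_eq' (Finset.range n.toNat) i.toNat (fun k => n * g k)]
  rw [if_pos (by simp only [Finset.mem_range]; omega)]
  have h5 : ((i.toNat : Int)) = i := Int.toNat_of_nonneg hi
  rw [h5]
  ring

-- A's inner loop computes pvF
lemma pv_inner_eq (a : List Int) (n : Int) (hn : 0 < n) (i : Int) :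
    (PySem.List.pyRange 0 n 1).foldl
      (fun su j => su + j * PySem.List.pyGetD a (PySem.Int.mod (i + j) n) 0) 0 = pvF a n i := by
  simp only [PySem.Int.mod_eq_emod_of_pos hn]
  rw [PySem.List.foldl_add _ (fun j => j * PySem.List.pyGetD a ((i + j) % n) 0) 0]
  rw [PySem.List.pyRange_one, List.map_map]
  unfold pvF
  rw [pv_sum_range]
  simp [Function.comp_def]

lemma pvF_zero (a : List Int) (n : Int) (hn : 0 < n) :
    pvF a n 0 = ∑ j ∈ Finset.range n.toNat, (j : Int) * PySem.List.pyGetD a (j : Int) 0 := by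
  unfold pvF
  refine Finset.sum_congr rfl (fun k hk => ?_)
  simp only [Finset.mem_range] at hk
  rw [zero_add, Int.emod_eq_of_lt (by omega) (by omega)]

-- the rotation recurrence
lemma pvF_succ (a : List Int) (n : Int) (hn : 0 < n) (i : Int) (hi : 0 ≤ i) (hi2 : i < n) :
    pvF a n (i + 1) = pvF a n i + n * PySem.List.pyGetD a i 0 - pvS a n := by
  have hg := pv_rot_reindex (fun x => PySem.List.pyGetD a x 0) n hn
  unfold pvF pvS
  rw [hg (i + 1), hg i]
  exact pv_step (fun x => PySem.List.pyGetD a x 0) n i hn hi hi2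

-- B's first loop computes (pvS, pvF 0)
lemma pv_first_loop (a : List Int) (n : Int) (hn : 0 < n) :
    (PySem.List.pyRange 0 n 1).foldl
      (fun (p : Int × Int) j =>
        (p.1 + PySem.List.pyGetD a j 0, p.2 + j * PySem.List.pyGetD a j 0)) (0, 0)
      = (pvS a n, pvF a n 0) := by
  rw [PySem.List.foldl_prod_mk
    (fun s j => s + PySem.List.pyGetD a j 0) (fun s j => s + j * PySem.List.pyGetD a j 0)]
  rw [PySem.List.foldl_add _ (fun j => PySem.List.pyGetD a j 0) 0]
  rw [PySem.List.foldl_add _ (fun j => j * PySem.List.pyGetD a j 0) 0]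
  rw [PySem.List.pyRange_one, List.map_map, List.map_map]
  rw [pvF_zero a n hn]
  unfold pvS
  rw [pv_sum_range, pv_sum_range]
  simp [Function.comp_def]

-- joint invariant of B's main loop against A's loop (with pvF substituted for the inner loop)
lemma pv_main_loop (a : List Int) (n : Int) (hn : 0 < n) :
    ∀ m : Int, 0 ≤ m → m ≤ n →
      (PySem.List.pyRange 0 m 1).foldl
        (fun (p : Int × Int) i =>
          ((if p.2 > p.1 then p.2 else p.1), p.2 + n * PySem.List.pyGetD a i 0 - pvS a n))
        (0, pvF a n 0)
      = ((PySem.List.pyRange 0 m 1).foldl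
          (fun ans i => if pvF a n i > ans then pvF a n i else ans) 0, pvF a n m) := by
  intro m hm
  induction m, hm using Int.le_induction with
  | base => intro _; rw [PySem.List.pyRange_one_eq_nil le_rfl]; rfl
  | succ m hm ih =>
    intro hmn
    rw [PySem.List.pyRange_one_succ_right hm, List.foldl_append, List.foldl_append,
      ih (by omega)]
    simp only [List.foldl_cons, List.foldl_nil]
    refine Prod.ext rfl ?_
    exact (pvF_succ a n hn m hm (by omega)).symm

-- ===== VERDICT (by name: the statement is the Claim_ definition above) =====
theorem brMax_sum_spec : Claim_equal_brMax_sum := by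
  intro a n _ _
  unfold Spec_brMax_sum brMax_sum brMax_sum_alt
  by_cases hn : n ≤ 0
  · simp [hn, PySem.List.pyRange_one_eq_nil hn]
  · rw [not_le] at hn
    simp only [if_neg (not_le.mpr hn)]
    rw [pv_first_loop a n hn]
    rw [pv_main_loop a n hn n (le_of_lt hn) le_rfl]
    congr 1
    funext ans i
    rw [pv_inner_eq a n hn i]
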